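-- pv_equiv track=rewrite | github.com/ADHD-exe/cursorforge | tools/source_slot_mapper_gui.py | recommended_redraw_master_size
-- ===== SOURCE A (Python) =====
-- def recommended_redraw_master_size(target_sizes: list[int]) -> int:
--     sizes = sorted(int(size) for size in target_sizes if int(size) > 0)
--     if not sizes:
--         return 64
--     max_target = max(sizes)
--     if max_target >= 192:
--         return 128
--     if max_target >= 128:
--         return 128
--     if max_target >= 96:
--         return 96
--     return max(64, max_target)
-- ===== SOURCE B (Python) =====
-- def recommended_redraw_master_size(target_sizes: list[int]) -> int:
--     result = 64
--     for size in target_sizes: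
--         s = int(size)
--         if s > 0:
--             if s >= 128:
--                 bucket = 128
--             elif s >= 96:
--                 bucket = 96
--             else:
--                 bucket = max(64, s)
--             result = max(result, bucket)
--     return result
-- ===== Notes on version B (the rewrite author's own statement) =====
-- stated objective: simpler
-- what changed: Replaced sort-then-classify-the-max with a single pass that classifies each positive element into its bucket and keeps a running max seeded at 64 (no sort, no post-hoc branch chain); correct because the bucket map is monotone.
import Mathlib
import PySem

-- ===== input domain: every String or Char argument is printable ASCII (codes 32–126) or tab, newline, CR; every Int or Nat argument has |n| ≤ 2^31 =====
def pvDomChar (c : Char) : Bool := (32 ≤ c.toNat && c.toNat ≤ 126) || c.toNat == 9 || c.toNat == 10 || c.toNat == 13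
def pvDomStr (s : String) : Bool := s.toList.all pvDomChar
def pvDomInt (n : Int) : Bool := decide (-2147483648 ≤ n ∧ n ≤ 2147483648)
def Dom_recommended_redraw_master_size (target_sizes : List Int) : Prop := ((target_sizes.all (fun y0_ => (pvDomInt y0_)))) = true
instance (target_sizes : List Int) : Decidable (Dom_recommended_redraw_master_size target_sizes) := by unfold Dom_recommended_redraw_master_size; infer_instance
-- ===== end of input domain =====

-- B replaces A's sort-then-classify-the-max with one pass classifying each positive
-- element into its bucket and folding a running max seeded at 64 (objective: simpler).

-- ===== PORT A =====
def recommended_redraw_master_size (target_sizes : List Int) : Int :=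
  -- sizes = sorted(int(size) for size in target_sizes if int(size) > 0)
  let sizes := PySem.List.sorted (target_sizes.filter (fun s => decide (0 < s))) (fun x => x) false
  if sizes = [] then 64
  else
    -- max(sizes); guarded by nonemptiness, so getD is never taken
    let max_target := (PySem.List.max? sizes (fun y => y)).getD 0
    if max_target ≥ 192 then 128
    else if max_target ≥ 128 then 128
    else if max_target ≥ 96 then 96
    else max 64 max_target

-- ===== PORT B =====
def recommended_redraw_master_size_alt (target_sizes : List Int) : Int :=
  target_sizes.foldl
    (fun result s =>
      if 0 < s then
        max result (if s ≥ 128 then 128 else if s ≥ 96 then 96 else max 64 s)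
      else result)
    64

-- ===== PRECONDITION & SPEC =====
def Spec_recommended_redraw_master_size (target_sizes : List Int) (out : Int) : Prop := out = recommended_redraw_master_size_alt target_sizes
instance (target_sizes : List Int) (out : Int) : Decidable (Spec_recommended_redraw_master_size target_sizes out) := by unfold Spec_recommended_redraw_master_size; infer_instance

-- ===== CLAIM (what is proved, stated in full; the proofs are below) =====
def Claim_equal_recommended_redraw_master_size : Prop := ∀ (target_sizes : List Int), Dom_recommended_redraw_master_size target_sizes → Spec_recommended_redraw_master_size target_sizes (recommended_redraw_master_size target_sizes)

-- ===== LEMMAS AND PROOFS =====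

-- the per-element bucket map
def pvBucket (s : Int) : Int := if s ≥ 128 then 128 else if s ≥ 96 then 96 else max 64 s

lemma pvBucket_max (a b : Int) : pvBucket (max a b) = max (pvBucket a) (pvBucket b) := by
  unfold pvBucket; split_ifs <;> omega

-- B's fold restricted to the positive elements, with buckets taken per element
lemma b_fold_filter (xs : List Int) (r : Int) :
    xs.foldl (fun result s => if 0 < s then max result (pvBucket s) else result) r
      = (xs.filter (fun s => decide (0 < s))).foldl (fun result s => max result (pvBucket s)) r := by
  induction xs generalizing r with
  | nil => rfl
  | cons x t ih =>
      by_cases h : 0 < x <;> simp [h, ih]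

-- folding max-of-bucket equals the bucket of the running max
lemma bucket_fold_max (ys : List Int) (a r : Int) :
    ys.foldl (fun result s => max result (pvBucket s)) (max r (pvBucket a))
      = max r (pvBucket (ys.foldl max a)) := by
  induction ys generalizing a r with
  | nil => rfl
  | cons y t ih =>
      simp only [List.foldl_cons]
      rw [max_assoc, ← pvBucket_max, ih]

-- the two running maxes over permuted nonempty lists agree
lemma foldl_max_eq_of_perm (l₁ l₂ : List Int) (a b : Int)
    (h : (a :: l₁).Perm (b :: l₂)) : l₁.foldl max a = l₂.foldl max b := by
  have h1 := PySem.List.le_foldl_max l₁ a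
  have h2 := PySem.List.le_foldl_max l₂ b
  have m1 : l₁.foldl max a ∈ a :: l₁ := by
    rcases PySem.List.foldl_max_mem l₁ a with hm | hm
    · rw [hm]; exact List.mem_cons_self
    · exact List.mem_cons_of_mem _ hm
  have m2 : l₂.foldl max b ∈ b :: l₂ := by
    rcases PySem.List.foldl_max_mem l₂ b with hm | hm
    · rw [hm]; exact List.mem_cons_self
    · exact List.mem_cons_of_mem _ hm
  apply le_antisymm
  · rcases List.mem_cons.mp (h.mem_iff.mp m1) with he | hm
    · rw [he]; exact h2.1
    · exact h2.2 _ hm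
  · rcases List.mem_cons.mp (h.symm.mem_iff.mp m2) with he | hm
    · rw [he]; exact h1.1
    · exact h1.2 _ hm

theorem a_eq_b (target_sizes : List Int) :
    recommended_redraw_master_size target_sizes = recommended_redraw_master_size_alt target_sizes := by
  unfold recommended_redraw_master_size recommended_redraw_master_size_alt
  have hb : (fun (result s : Int) => if 0 < s then
        max result (if s ≥ 128 then 128 else if s ≥ 96 then 96 else max 64 s) else result)
      = fun result s => if 0 < s then max result (pvBucket s) else result := by
    funext result s; simp [pvBucket]
  rw [hb, b_fold_filter]
  by_cases hnil : PySem.List.sorted (target_sizes.filter (fun s => decide (0 < s))) (fun x => x) false = []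
  · rw [if_pos hnil, (PySem.List.sorted_eq_nil_iff _ _ _).mp hnil]
    rfl
  · rw [if_neg hnil]
    have hperm := PySem.List.sorted_perm (target_sizes.filter (fun s => decide (0 < s))) (fun x => x) false
    rcases hs : PySem.List.sorted (target_sizes.filter (fun s => decide (0 < s))) (fun x => x) false with _ | ⟨m, t⟩
    · exact absurd hs hnil
    rcases hp : target_sizes.filter (fun s => decide (0 < s)) with _ | ⟨p, pt⟩
    · rw [hs, hp] at hperm
      simpa using hperm.length_eq
    · rw [hs, hp] at hperm
      rw [PySem.List.max?_id_cons, Option.getD_some]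
      have hmax : t.foldl max m = pt.foldl max p := foldl_max_eq_of_perm t pt m p hperm
      have hfold : pt.foldl (fun result s => max result (pvBucket s)) (max 64 (pvBucket p))
          = max 64 (pvBucket (pt.foldl max p)) := bucket_fold_max pt p 64
      simp only [List.foldl_cons]
      rw [hfold, ← hmax]
      unfold pvBucket
      split_ifs <;> omega

-- ===== VERDICT (by name: the statement is the Claim_ definition above) =====
theorem recommended_redraw_master_size_spec : Claim_equal_recommended_redraw_master_size := by
  intro target_sizes _
  unfold Spec_recommended_redraw_master_size
  exact a_eq_b target_sizes
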